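-- pv_equiv track=rewrite | github.com/TengWeiKang/PythonAIGame | main.py | _format_detections_as_text
-- ===== SOURCE A (Python) =====
-- from typing import Optional, Dict, Any, List
--
-- def _format_detections_as_text(detections: List[Dict[str, Any]], image_label: str) -> str:
--     """Format YOLO detections as human-readable text.
--
--     Args:
--         detections: List of detection dictionaries from YOLO
--         image_label: Label for the image (e.g., "Current Frame" or "Reference Image")
--
--     Returns:
--         Formatted string describing detected objects
--     """
--     if not detections:
--         return f"{image_label}: No objects detected"
--
--     # Count objects by class
--     class_counts = {}
--     for det in detections:
--         class_name = det['class_name']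
--         class_counts[class_name] = class_counts.get(class_name, 0) + 1
--
--     # Build summary
--     items = [f"{class_name} ({count})" for class_name, count in sorted(class_counts.items())]
--     return f"{image_label}: {', '.join(items)}"
-- ===== SOURCE B (Python) =====
-- def _format_detections_as_text(detections, image_label):
--     if not detections:
--         return f"{image_label}: No objects detected"
--
--     # Sort the class names, then emit consecutive runs with their lengths.
--     names = sorted(det['class_name'] for det in detections)
--     parts = []
--     rest = names
--     while rest:
--         head = rest[0]
--         run = 1
--         while run < len(rest) and rest[run] == head:
--             run += 1
--         parts.append(f"{head} ({run})")
--         rest = rest[run:]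
--     return f"{image_label}: {', '.join(parts)}"
-- ===== Notes on version B (the rewrite author's own statement) =====
-- stated objective: alternative
-- what changed: Replaces dict-based counting followed by sorting the (name,count) pairs with a sort of the class names first and a single grouping pass that emits each consecutive run with its length.
import Mathlib
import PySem

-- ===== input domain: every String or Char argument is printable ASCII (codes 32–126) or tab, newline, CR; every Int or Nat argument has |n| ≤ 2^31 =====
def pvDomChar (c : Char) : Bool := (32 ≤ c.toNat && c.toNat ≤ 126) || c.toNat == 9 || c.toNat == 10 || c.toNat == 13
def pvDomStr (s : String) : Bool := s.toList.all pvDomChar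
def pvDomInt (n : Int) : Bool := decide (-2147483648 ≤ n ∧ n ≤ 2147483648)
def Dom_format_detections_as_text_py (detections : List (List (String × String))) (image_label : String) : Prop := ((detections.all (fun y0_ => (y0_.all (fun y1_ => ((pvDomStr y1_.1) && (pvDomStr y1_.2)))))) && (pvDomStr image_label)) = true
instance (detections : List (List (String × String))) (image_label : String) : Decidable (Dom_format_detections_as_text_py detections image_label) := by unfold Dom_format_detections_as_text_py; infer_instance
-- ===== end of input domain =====

-- ===== PORT A =====
-- B replaces the dict-counting pass of A by sort-then-group-runs; equivalence proved on inputs where every detection has a 'class_name' key.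
def format_detections_as_text_py (detections : List (List (String × String))) (image_label : String) : String :=
  if detections = [] then image_label ++ ": No objects detected"
  else
    -- class_counts loop: class_counts[class_name] = class_counts.get(class_name, 0) + 1
    let counts : PySem.Dict String Int := detections.foldl
      (fun d det =>
        let cn := (PySem.Dict.mk det).getD "class_name" ""   -- det['class_name'] (Pre_ guarantees the key is present)
        d.insert cn (d.getD cn 0 + 1)) (PySem.Dict.mk [])
    let items := (PySem.List.sorted2 counts.items Prod.fst Prod.snd).map
      (fun p => p.1 ++ " (" ++ PySem.Int.toStr p.2 ++ ")")
    image_label ++ ": " ++ PySem.Str.join ", " items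

-- ===== PORT B =====
-- the outer while loop of Source B: each step formats the leading run (the inner while counts
-- run = 1 + length of the matching prefix of the tail) and continues on rest[run:]
def pvRuns_format (rest : List String) : List String :=
  match rest with
  | [] => []
  | y :: u =>
      (y ++ " (" ++ PySem.Int.toStr (1 + ((u.takeWhile (fun x => x == y)).length : Int)) ++ ")")
        :: pvRuns_format (u.dropWhile (fun x => x == y))
termination_by rest.length
decreasing_by
  simp only [List.length_cons]
  exact Nat.lt_succ_of_le (u.length_dropWhile_le (fun x => x == y))

def format_detections_as_text_py_alt (detections : List (List (String × String))) (image_label : String) : String :=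
  if detections = [] then image_label ++ ": No objects detected"
  else
    let names := PySem.List.sorted
      (detections.map (fun det => (PySem.Dict.mk det).getD "class_name" "")) (fun x => x)
    image_label ++ ": " ++ PySem.Str.join ", " (pvRuns_format names)

-- ===== PRECONDITION & SPEC =====
-- Pre_ excludes exactly the inputs where some detection lacks the 'class_name' key: there Python A raises KeyError.
def Pre_format_detections_as_text_py (detections : List (List (String × String))) (image_label : String) : Prop :=
  (detections.all (fun det => (PySem.Dict.mk det).contains "class_name")) = true
instance (detections : List (List (String × String))) (image_label : String) : Decidable (Pre_format_detections_as_text_py detections image_label) := by unfold Pre_format_detections_as_text_py; infer_instance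

def pvWitness_format_detections_as_text_py : (List (List (String × String))) × String :=
  ([[("class_name", "cat")], [("class_name", "dog")], [("class_name", "cat")]], "Current Frame")

def Spec_format_detections_as_text_py (detections : List (List (String × String))) (image_label : String) (out : String) : Prop := out = format_detections_as_text_py_alt detections image_label
instance (detections : List (List (String × String))) (image_label : String) (out : String) : Decidable (Spec_format_detections_as_text_py detections image_label out) := by unfold Spec_format_detections_as_text_py; infer_instance

-- ===== CLAIM (what is proved, stated in full; the proofs are below) =====
def Claim_equal_format_detections_as_text_py : Prop := ∀ (detections : List (List (String × String))) (image_label : String), Dom_format_detections_as_text_py detections image_label → Pre_format_detections_as_text_py detections image_label → Spec_format_detections_as_text_py detections image_label (format_detections_as_text_py detections image_label)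

-- ===== LEMMAS AND PROOFS =====

lemma pv_insertBy_congr {α : Type} (p q : α → α → Bool) (x : α) (ys : List α)
    (h : ∀ y ∈ ys, p x y = q x y) :
    PySem.List.insertBy p x ys = PySem.List.insertBy q x ys := by
  induction ys with
  | nil => rfl
  | cons y t ih =>
      simp only [PySem.List.insertBy, h y (by simp)]
      split <;> simp_all

lemma pv_foldl_insertBy_congr {α : Type} (p q : α → α → Bool) (l acc : List α)
    (h : ∀ a b, a ∈ l → (b ∈ acc ∨ b ∈ l) → p a b = q a b) :
    l.foldl (fun acc x => PySem.List.insertBy p x acc) acc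
      = l.foldl (fun acc x => PySem.List.insertBy q x acc) acc := by
  induction l generalizing acc with
  | nil => rfl
  | cons x t ih =>
      simp only [List.foldl_cons]
      rw [pv_insertBy_congr p q x acc (fun y hy => h x y (by simp) (Or.inl hy))]
      refine ih _ (fun a b ha hb => h a b (by simp [ha]) ?_)
      rcases hb with hb | hb
      · rcases (PySem.List.mem_insertBy _ _ _ _).mp hb with hb | hb
        · subst hb; exact Or.inr (by simp)
        · exact Or.inl hb
      · exact Or.inr (by simp [hb])

-- sorted with a Prod.snd tiebreak equals sorted by Prod.fst when equal firsts imply equal pairs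
lemma pv_sorted2_eq_sorted (xs : List (String × Int))
    (h : ∀ a ∈ xs, ∀ b ∈ xs, a.1 = b.1 → a = b) :
    PySem.List.sorted2 xs Prod.fst Prod.snd = PySem.List.sorted xs Prod.fst := by
  simp only [PySem.List.sorted2, PySem.List.sorted, if_neg (by decide : ¬ (false = true))]
  refine pv_foldl_insertBy_congr _ _ xs [] (fun a b ha hb => ?_)
  have hb' : b ∈ xs := hb.elim (fun hbn => absurd hbn (by simp)) id
  by_cases hfst : a.1 = b.1
  · have : a = b := h a ha b hb' hfst
    subst this
    simp
  · rcases lt_or_gt_of_ne hfst with hlt | hgt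
    · simp [hlt, not_lt_of_gt hlt]
    · simp [hgt, not_lt_of_gt hgt]

-- the canonical pair list both sides reduce to
def pvPairs (names : List String) : List (String × Int) :=
  (PySem.List.sorted (PySem.Set.ofList names) (fun x => x)).map
    (fun k => (k, (names.count k : Int)))

def pvFmt (p : String × Int) : String := p.1 ++ " (" ++ PySem.Int.toStr p.2 ++ ")"

-- A side: the sorted counter items are exactly pvPairs
lemma pv_A_items (names : List String) :
    PySem.List.sorted2 (PySem.Dict.counter names).items Prod.fst Prod.snd = pvPairs names := by
  have hitems := PySem.Dict.items_counter names
  have hnodupkeys : ((PySem.Dict.counter names).items.map Prod.fst).Nodup :=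
    PySem.Dict.nodup_keys_counter names
  rw [pv_sorted2_eq_sorted _ (fun a ha b hb hfst => ?_)]
  · refine PySem.List.sorted_eq_of_perm_of_pairwise_lt _ _ _ ?_ ?_
    · rw [hitems]
      exact ((PySem.List.sorted_perm _ _ false).map _)
    · have hpw := PySem.List.sorted_ofList_pairwise_lt names
      exact List.Pairwise.map _ (by intro a b hab; simpa using hab) hpw
  · exact List.inj_on_of_nodup_map hnodupkeys ha hb hfst

-- run-length grouping of a sorted list yields the formatted pvPairs of that list
lemma pv_runs_sorted (S : List String) (hpw : S.Pairwise (· ≤ ·)) :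
    pvRuns_format S
      = ((PySem.List.sorted (PySem.Set.ofList S) (fun x => x)).map
          (fun k => (k, (S.count k : Int)))).map pvFmt := by
  induction S using pvRuns_format.induct with
  | case1 => simp [pvRuns_format]; rfl
  | case2 y u ih =>
      have hpwu : u.Pairwise (· ≤ ·) := hpw.of_cons
      have hyle : ∀ x ∈ u, y ≤ x := fun x hx => (List.pairwise_cons.mp hpw).1 x hx
      set t := u.takeWhile (fun x => x == y) with ht
      set d := u.dropWhile (fun x => x == y) with hd
      have htd : t ++ d = u := List.takeWhile_append_dropWhile
      have htall : ∀ x ∈ t, x = y := fun x hx => by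
        simpa using List.mem_takeWhile_imp hx
      have hdsub : d.Sublist u := List.dropWhile_sublist _
      have hdpw : d.Pairwise (· ≤ ·) := hpwu.sublist hdsub
      have hynotd : ∀ x ∈ d, y < x := by
        intro x hx
        refine lt_of_le_of_ne (hyle x (hdsub.mem hx)) (fun hyx => ?_)
        subst hyx
        cases hdd : d with
        | nil => rw [hdd] at hx; simp at hx
        | cons h0 d' =>
            have hh0 : ¬ (h0 == y) = true := by
              have := List.head?_dropWhile_not (fun x => x == y) u
              rw [← hd, hdd] at this
              simp at this ⊢
              simp [this]
            have hyh0 : y ≤ h0 := hyle h0 (hdsub.mem (by rw [hdd]; simp))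
            rw [hdd] at hx
            rcases List.mem_cons.mp hx with hx | hx
            · exact hh0 (by simp [hx])
            · have hpc := List.pairwise_cons.mp (by rw [hdd] at hdpw; exact hdpw)
              have : h0 ≤ y := hpc.1 y hx
              exact hh0 (by simp [le_antisymm this hyh0])
      have hcounty : (y :: u).count y = 1 + t.length := by
        have hcu : u.count y = t.count y + d.count y := by
          rw [← htd]; simp [List.count_append]
        have hct : t.count y = t.length := by
          apply List.count_eq_length.mpr
          intro x hx; simp [htall x hx]
        have hcd : d.count y = 0 := by
          apply List.count_eq_zero.mpr
          intro hy; exact absurd rfl (ne_of_gt (hynotd y hy))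
        simp [List.count_cons_self, hcu, hct, hcd]; omega
      -- the sorted distinct elements of y::u are y followed by those of d
      have hkeys : PySem.List.sorted (PySem.Set.ofList (y :: u)) (fun x => x)
          = y :: PySem.List.sorted (PySem.Set.ofList d) (fun x => x) := by
        refine PySem.List.sorted_eq_of_perm_of_pairwise_lt _ _ _ ?_ ?_
        · rw [List.perm_ext_iff_of_nodup ?_ (PySem.Set.nodup_ofList _)]
          · intro a
            simp only [List.mem_cons, PySem.List.mem_sorted, PySem.Set.mem_ofList]
            constructor
            · rintro (rfl | had)
              · simp
              · exact Or.inr (by rw [← htd]; exact List.mem_append.mpr (Or.inr had))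
            · rintro (rfl | hau)
              · simp
              · rw [← htd] at hau
                rcases List.mem_append.mp hau with hat | had
                · exact Or.inl (htall a hat)
                · exact Or.inr had
          · refine List.nodup_cons.mpr ⟨?_, (PySem.List.sorted_perm _ _ _).nodup_iff.mpr (PySem.Set.nodup_ofList _)⟩
            intro hy
            have : y ∈ d := (PySem.Set.mem_ofList _ _).mp ((PySem.List.mem_sorted _ _ _ _).mp hy)
            exact absurd rfl (ne_of_gt (hynotd y this))
        · refine List.pairwise_cons.mpr ⟨?_, PySem.List.sorted_ofList_pairwise_lt d⟩
          intro a ha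
          exact hynotd a ((PySem.Set.mem_ofList _ _).mp ((PySem.List.mem_sorted _ _ _ _).mp ha))
      have hcountk : ∀ k ∈ PySem.List.sorted (PySem.Set.ofList d) (fun x => x),
          (y :: u).count k = d.count k := by
        intro k hk
        have hkd : k ∈ d := (PySem.Set.mem_ofList _ _).mp ((PySem.List.mem_sorted _ _ _ _).mp hk)
        have hky : k ≠ y := ne_of_gt (hynotd k hkd)
        have hct : t.count k = 0 := by
          apply List.count_eq_zero.mpr
          intro hkt; exact hky (htall k hkt)
        rw [← htd]
        simp [List.count_append, hct, Ne.symm hky]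
      rw [pvRuns_format, hkeys]
      simp only [List.map_cons, List.map_map]
      congr 1
      · simp only [pvFmt, ← ht]
        congr 3
        rw [hcounty]; push_cast; ring
      · rw [ih hdpw]
        simp only [List.map_map]
        refine List.map_congr_left (fun k hk => ?_)
        simp [pvFmt, hcountk k hk]

lemma pv_foldl_det (l : List (List (String × String))) (d : PySem.Dict String Int) :
    l.foldl (fun d det =>
        let cn := (PySem.Dict.mk det).getD "class_name" ""
        d.insert cn (d.getD cn 0 + 1)) d
      = (l.map (fun det => (PySem.Dict.mk det).getD "class_name" "")).foldl
          (fun d x => d.insert x (d.getD x 0 + 1)) d := by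
  induction l generalizing d with
  | nil => rfl
  | cons x t ih => simp [ih]

theorem format_detections_as_text_py_spec : Claim_equal_format_detections_as_text_py := by
  intro detections image_label _hdom _hpre
  unfold Spec_format_detections_as_text_py
  unfold format_detections_as_text_py format_detections_as_text_py_alt
  by_cases hnil : detections = []
  · simp [hnil]
  · simp only [if_neg hnil]
    set names := detections.map (fun det => (PySem.Dict.mk det).getD "class_name" "") with hnames
    congr 1
    -- A's counting fold over detections is the counter of names
    have hfold : detections.foldl
        (fun d det =>
          let cn := (PySem.Dict.mk det).getD "class_name" ""
          d.insert cn (d.getD cn 0 + 1)) (PySem.Dict.mk [])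
        = PySem.Dict.counter names := by
      rw [pv_foldl_det, ← hnames]
      exact PySem.Dict.foldl_insert_getD_add_one_eq_counter names
    rw [hfold]
    -- both item lists are the formatted pvPairs of names
    have hA : (PySem.List.sorted2 (PySem.Dict.counter names).items Prod.fst Prod.snd).map
        (fun p => p.1 ++ " (" ++ PySem.Int.toStr p.2 ++ ")")
        = (pvPairs names).map pvFmt := by
      rw [pv_A_items]; rfl
    have hB : pvRuns_format (PySem.List.sorted names (fun x => x))
        = (pvPairs names).map pvFmt := by
      rw [pv_runs_sorted _ (by simpa using PySem.List.sorted_pairwise names (fun x => x))]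
      unfold pvPairs
      congr 1
      have hperm : (PySem.Set.ofList (PySem.List.sorted names (fun x => x))).Perm
          (PySem.Set.ofList names) := by
        rw [List.perm_ext_iff_of_nodup (PySem.Set.nodup_ofList _) (PySem.Set.nodup_ofList _)]
        intro a
        simp [PySem.Set.mem_ofList, PySem.List.mem_sorted]
      rw [PySem.List.sorted_eq_sorted_of_perm _ _ _ (fun a b h => h) hperm]
      refine List.map_congr_left (fun k _ => ?_)
      congr 2
      exact ((PySem.List.sorted_perm names (fun x => x) false).count_eq k)
    rw [hA, hB]
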